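-- pv_equiv track=rewrite | github.com/chinmay6497/python_examples | odd_evenlist.py | odd_even
-- ===== SOURCE A (Python) =====
-- def odd_even(l):
--     odd=[]
--     even=[]
--     for i in range(len(l)):
--         if i%2==0:
--             even.append(i)
--         else:
--             odd.append(i)
--     z=[odd] + [even]
--     return z
-- ===== SOURCE B (Python) =====
-- def odd_even(l):
--     n = len(l)
--     return [list(range(1, n, 2)), list(range(0, n, 2))]
-- ===== Notes on version B (the rewrite author's own statement) =====
-- stated objective: idiomatic
-- what changed: Replaces the per-index loop with a modulo-2 branch and two growing accumulators by directly materialising each parity class with an arithmetic step-2 range.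
import Mathlib
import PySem

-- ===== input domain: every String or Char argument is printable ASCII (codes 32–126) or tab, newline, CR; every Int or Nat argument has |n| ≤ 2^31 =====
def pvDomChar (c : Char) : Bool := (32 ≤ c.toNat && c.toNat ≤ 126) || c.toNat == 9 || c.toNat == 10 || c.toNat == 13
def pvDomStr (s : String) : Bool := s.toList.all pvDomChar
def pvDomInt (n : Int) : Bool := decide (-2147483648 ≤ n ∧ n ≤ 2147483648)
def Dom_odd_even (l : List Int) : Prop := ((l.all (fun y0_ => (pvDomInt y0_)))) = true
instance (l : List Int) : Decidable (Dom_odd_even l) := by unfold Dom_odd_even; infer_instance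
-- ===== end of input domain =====

-- B replaces A's per-index loop with a modulo branch by directly enumerating each
-- parity class with a step-2 range (idiomatic; same asymptotic cost).

-- ===== PORT A =====
def odd_even (l : List Int) : List (List Int) :=
  let z := (PySem.List.pyRange 0 (l.length : Int) 1).foldl
    (fun (s : List Int × List Int) i =>
      if PySem.Int.mod i 2 == 0 then (s.1, s.2 ++ [i]) else (s.1 ++ [i], s.2))
    ([], [])
  [z.1] ++ [z.2]

-- ===== PORT B =====
def odd_even_alt (l : List Int) : List (List Int) :=
  [PySem.List.pyRange 1 (l.length : Int) 2, PySem.List.pyRange 0 (l.length : Int) 2]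

-- ===== PRECONDITION & SPEC =====
def Spec_odd_even (l : List Int) (out : List (List Int)) : Prop := out = odd_even_alt l
instance (l : List Int) (out : List (List Int)) : Decidable (Spec_odd_even l out) := by unfold Spec_odd_even; infer_instance

-- ===== CLAIM (what is proved, stated in full; the proofs are below) =====
def Claim_equal_odd_even : Prop := ∀ (l : List Int), Dom_odd_even l → Spec_odd_even l (odd_even l)

-- ===== LEMMAS AND PROOFS =====

lemma mod_two_cast_eq (n : Nat) : PySem.Int.mod (n : Int) 2 = ((n % 2 : Nat) : Int) := by
  rw [PySem.Int.mod_eq_emod_of_pos (by norm_num)]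
  omega

-- closed forms for the two step-2 ranges
lemma pyRange_two_even (n : Nat) :
    PySem.List.pyRange 0 (n : Int) 2 = (List.range ((n + 1) / 2)).map (fun k : Nat => (2 * (k : Int))) := by
  unfold PySem.List.pyRange
  simp only [if_neg (by norm_num : ¬ (2 : Int) = 0), if_pos (by norm_num : (0 : Int) < 2)]
  rcases Nat.eq_zero_or_pos n with h | h
  · subst h; simp
  · rw [if_pos (by exact_mod_cast h)]
    have hc : (((n : Int) - 0 + 2 - 1) / 2).toNat = (n + 1) / 2 := by omega
    rw [hc]
    try exact List.map_congr_left (fun k _ => by ring)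

lemma pyRange_two_odd (n : Nat) :
    PySem.List.pyRange 1 (n : Int) 2 = (List.range (n / 2)).map (fun k : Nat => (1 + 2 * (k : Int))) := by
  unfold PySem.List.pyRange
  simp only [if_neg (by norm_num : ¬ (2 : Int) = 0), if_pos (by norm_num : (0 : Int) < 2)]
  by_cases h : (1 : Int) < (n : Int)
  · rw [if_pos h]
    have hc : (((n : Int) - 1 + 2 - 1) / 2).toNat = n / 2 := by omega
    rw [hc]
    try exact List.map_congr_left (fun k _ => by ring)
  · rw [if_neg h]
    have hc : n / 2 = 0 := by omega
    rw [hc]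
    try simp

-- the parity filters of range n are exactly the step-2 ranges
lemma filter_even (n : Nat) :
    ((List.range n).map (fun k : Nat => (k : Int))).filter (fun i => PySem.Int.mod i 2 == 0)
      = (List.range ((n + 1) / 2)).map (fun k : Nat => (2 * (k : Int))) := by
  induction n with
  | zero => simp
  | succ n ih =>
    rw [List.range_succ, List.map_append, List.filter_append, ih]
    by_cases h : n % 2 = 0
    · have hm : (PySem.Int.mod (n : Int) 2 == 0) = true := by
        rw [mod_two_cast_eq]; simp; omega
      have hc : (n + 1 + 1) / 2 = (n + 1) / 2 + 1 := by omega
      rw [hc, List.range_succ, List.map_append]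
      simp only [List.map_cons, List.map_nil, List.filter_cons, hm, if_true]
      simp
      omega
    · have hm : (PySem.Int.mod (n : Int) 2 == 0) = false := by
        rw [mod_two_cast_eq]; simp; omega
      have hc : (n + 1 + 1) / 2 = (n + 1) / 2 := by omega
      rw [hc]
      simp only [List.map_cons, List.map_nil, List.filter_cons, hm]
      simp

lemma filter_odd (n : Nat) :
    ((List.range n).map (fun k : Nat => (k : Int))).filter (fun i => !(PySem.Int.mod i 2 == 0))
      = (List.range (n / 2)).map (fun k : Nat => (1 + 2 * (k : Int))) := by
  induction n with
  | zero => simp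
  | succ n ih =>
    rw [List.range_succ, List.map_append, List.filter_append, ih]
    by_cases h : n % 2 = 0
    · have hm : (PySem.Int.mod (n : Int) 2 == 0) = true := by
        rw [mod_two_cast_eq]; simp; omega
      have hc : (n + 1) / 2 = n / 2 := by omega
      rw [hc]
      simp only [List.map_cons, List.map_nil, List.filter_cons, hm]
      simp
    · have hm : (PySem.Int.mod (n : Int) 2 == 0) = false := by
        rw [mod_two_cast_eq]; simp; omega
      have hc : (n + 1) / 2 = n / 2 + 1 := by omega
      rw [hc, List.range_succ, List.map_append]
      simp only [List.map_cons, List.map_nil, List.filter_cons, hm, Bool.not_false, if_true]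
      simp
      omega

lemma pyRange_zero_one (n : Nat) :
    PySem.List.pyRange 0 (n : Int) 1 = (List.range n).map (fun k : Nat => (k : Int)) := by
  rw [PySem.List.pyRange_one]
  simp

lemma fold_split (L : List Int) :
    L.foldl
      (fun (s : List Int × List Int) i =>
        if PySem.Int.mod i 2 == 0 then (s.1, s.2 ++ [i]) else (s.1 ++ [i], s.2))
      ([], [])
    = (L.filter (fun i => !(PySem.Int.mod i 2 == 0)),
       L.filter (fun i => PySem.Int.mod i 2 == 0)) := by
  have hstep : (fun (s : List Int × List Int) (i : Int) =>
      if PySem.Int.mod i 2 == 0 then (s.1, s.2 ++ [i]) else (s.1 ++ [i], s.2))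
    = fun (s : List Int × List Int) (i : Int) =>
      ((fun (o : List Int) (i : Int) => if !(PySem.Int.mod i 2 == 0) then o ++ [i] else o) s.1 i,
       (fun (e : List Int) (i : Int) => if PySem.Int.mod i 2 == 0 then e ++ [i] else e) s.2 i) := by
    funext s i
    cases hc : (PySem.Int.mod i 2 == 0) <;> simp only [hc] <;> rfl
  rw [hstep,
      PySem.List.foldl_prod_mk
        (f := fun (o : List Int) (i : Int) => if !(PySem.Int.mod i 2 == 0) then o ++ [i] else o)
        (g := fun (e : List Int) (i : Int) => if PySem.Int.mod i 2 == 0 then e ++ [i] else e),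
      PySem.List.foldl_append_if_eq_filter,
      PySem.List.foldl_append_if_eq_filter, List.nil_append, List.nil_append]

-- ===== VERDICT (by name: the statement is the Claim_ definition above) =====
theorem odd_even_spec : Claim_equal_odd_even := by
  intro l _
  show odd_even l = odd_even_alt l
  unfold odd_even odd_even_alt
  simp only [fold_split, pyRange_zero_one, filter_even, filter_odd,
    pyRange_two_even, pyRange_two_odd]
  rfl
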